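-- pv_equiv track=rewrite | github.com/mgesbert/advent | src/2023/algo/day_1.py | part_2
-- ===== SOURCE A (Python) =====
-- def replace_digits(line):
--     translations = {
--         "zero": "0",
--         "one": "1",
--         "two": "2",
--         "three": "3",
--         "four": "4",
--         "five": "5",
--         "six": "6",
--         "seven": "7",
--         "eight": "8",
--         "nine": "9",
--     }
--     res = ""
--     for i, c in enumerate(line):
--         word = next((k for k in translations.keys() if line[i:].startswith(k)), None)
--         if word:
--             res += translations[word]
--         else:
--             res += c
--
--     return res
--
-- def part_2(input_data):
--     return sum(
--         int(
--             next(c for c in replace_digits(line) if c.isdigit())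
--             + next(c for c in replace_digits(line)[::-1] if c.isdigit())
--         )
--         for line in input_data
--     )
-- ===== SOURCE B (Python) =====
-- WORDS = [
--     ("zero", "0"), ("one", "1"), ("two", "2"), ("three", "3"), ("four", "4"),
--     ("five", "5"), ("six", "6"), ("seven", "7"), ("eight", "8"), ("nine", "9"),
-- ]
--
-- def digit_at(line, i):
--     if line[i].isdigit():
--         return line[i]
--     for w, d in WORDS:
--         if line.startswith(w, i):
--             return d
--     return None
--
-- def part_2(input_data):
--     total = 0
--     for line in input_data:
--         first = next(d for i in range(len(line)) if (d := digit_at(line, i)) is not None)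
--         last = next(d for i in reversed(range(len(line))) if (d := digit_at(line, i)) is not None)
--         total += int(first + last)
--     return total
-- ===== Notes on version B (the rewrite author's own statement) =====
-- stated objective: simpler
-- what changed: B drops A's build-the-translated-string-then-scan-it-twice pipeline: a digit_at(line, i) helper reads the digit (literal or spelled) directly at each position, and the first/last digits are found by scanning indices from the left and from the right, never materialising an intermediate string.
import Mathlib
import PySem

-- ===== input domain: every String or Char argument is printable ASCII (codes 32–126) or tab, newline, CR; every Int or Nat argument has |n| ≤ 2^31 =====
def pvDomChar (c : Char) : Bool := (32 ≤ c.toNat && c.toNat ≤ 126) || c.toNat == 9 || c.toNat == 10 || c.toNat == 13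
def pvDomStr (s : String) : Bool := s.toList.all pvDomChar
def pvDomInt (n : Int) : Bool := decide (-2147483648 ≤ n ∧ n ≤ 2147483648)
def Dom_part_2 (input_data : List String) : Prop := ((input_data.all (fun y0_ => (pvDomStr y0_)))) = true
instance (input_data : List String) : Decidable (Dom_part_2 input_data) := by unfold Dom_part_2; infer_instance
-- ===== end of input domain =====

-- B replaces A's build-the-translated-string-then-scan-twice by a direct positional scan
-- (digit_at per index, first hit from the left and from the right); objective: simpler, no speed claim.

-- ===== PORT A =====
def pvTransA : PySem.Dict (List Char) (List Char) :=
  PySem.Dict.ofList [("zero".toList, "0".toList), ("one".toList, "1".toList),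
    ("two".toList, "2".toList), ("three".toList, "3".toList), ("four".toList, "4".toList),
    ("five".toList, "5".toList), ("six".toList, "6".toList), ("seven".toList, "7".toList),
    ("eight".toList, "8".toList), ("nine".toList, "9".toList)]

def replace_digits (line : List Char) : List Char :=
  (PySem.List.enumerate line).foldl (fun res ic =>
    match (pvTransA.keys).find? (fun k =>
        PySem.Chars.startswith (PySem.List.slice line (some ic.1) none) k) with
    | some word => res ++ pvTransA.getD word []   -- translations[word]; the key is always present
    | none => res ++ [ic.2]) []

def part_2 (input_data : List String) : Int :=
  (input_data.map (fun line =>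
     let t := replace_digits line.toList
     -- next(…) raises on a line with no digit: those inputs are excluded by Pre_part_2
     let first := (t.find? PySem.Chars.isdigit).getD '0'
     -- t[::-1] is reversal (PySem.List.slice?_none_none_neg_one)
     let last := (t.reverse.find? PySem.Chars.isdigit).getD '0'
     -- int(first + last): both chars are digits, so int(…) cannot raise
     (PySem.Int.ofChars? [first, last]).getD 0)).sum

-- ===== PORT B =====
def pvWordsB : List (List Char × Char) :=
  [("zero".toList, '0'), ("one".toList, '1'), ("two".toList, '2'), ("three".toList, '3'),
   ("four".toList, '4'), ("five".toList, '5'), ("six".toList, '6'), ("seven".toList, '7'),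
   ("eight".toList, '8'), ("nine".toList, '9')]

def digit_at (line : List Char) (i : Nat) : Option Char :=
  match PySem.List.pyGet? line (i : Int) with
  | none => none   -- B only calls digit_at with i < len(line), so this branch is unreachable
  | some c =>
    if PySem.Chars.isdigit c then some c
    else
      -- line.startswith(w, i) = w is a prefix of line[i:]; exact for 0 ≤ i ≤ len(line)
      (pvWordsB.find? (fun wd => PySem.Chars.startswith (line.drop i) wd.1)).map (·.2)

def first_digit (line : List Char) : Option Char :=
  (List.range line.length).findSome? (digit_at line)

def last_digit (line : List Char) : Option Char :=
  (List.range line.length).reverse.findSome? (digit_at line)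

def part_2_alt (input_data : List String) : Int :=
  input_data.foldl (fun total line =>
    -- next(…) raises on a line with no digit: those inputs are excluded by Pre_part_2
    total + (PySem.Int.ofChars? [(first_digit line.toList).getD '0',
                                 (last_digit line.toList).getD '0']).getD 0) 0

-- ===== PRECONDITION & SPEC =====
-- Pre_ excludes lines containing neither a digit character nor a spelled digit word:
-- on those both Pythons raise (A: RuntimeError from the exhausted next(); B: StopIteration).
def Pre_part_2 (input_data : List String) : Prop :=
  ∀ line ∈ input_data,
    line.toList.any PySem.Chars.isdigit = true ∨
    ∃ w ∈ (["zero", "one", "two", "three", "four", "five", "six", "seven", "eight", "nine"] : List String),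
      PySem.Chars.isIn w.toList line.toList = true

instance (input_data : List String) : Decidable (Pre_part_2 input_data) := by
  unfold Pre_part_2; infer_instance

def pvWitness_part_2 : List String := ["two1nine", "xyz4"]

def Spec_part_2 (input_data : List String) (out : Int) : Prop := out = part_2_alt input_data
instance (input_data : List String) (out : Int) : Decidable (Spec_part_2 input_data out) := by
  unfold Spec_part_2; infer_instance

-- ===== CLAIM (what is proved, stated in full; the proofs are below) =====
def Claim_equal_part_2 : Prop := ∀ (input_data : List String), Dom_part_2 input_data → Pre_part_2 input_data → Spec_part_2 input_data (part_2 input_data)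

-- ===== LEMMAS AND PROOFS =====

-- the character A's translated string carries at position k
def pvChar (cs : List Char) (k : Nat) : Char :=
  match pvWordsB.find? (fun wd => PySem.Chars.startswith (cs.drop k) wd.1) with
  | some wd => wd.2
  | none => cs.getD k ' '

lemma pv_keys_eq : pvTransA.keys = pvWordsB.map (·.1) := by decide

lemma pv_getD_eq (wd : List Char × Char) (h : wd ∈ pvWordsB) :
    pvTransA.getD wd.1 [] = [wd.2] := by
  fin_cases h <;> decide

lemma pv_snd_digit (wd : List Char × Char) (h : wd ∈ pvWordsB) :
    PySem.Chars.isdigit wd.2 = true := by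
  fin_cases h <;> decide

lemma pv_digit_le (c : Char) (h : PySem.Chars.isdigit c = true) : c.toNat ≤ 57 := by
  simp only [PySem.Chars.isdigit, Bool.and_eq_true, decide_eq_true_eq, Char.le_def] at h
  exact UInt32.le_iff_toNat_le.mp h.2

lemma pv_digit_no_word (c : Char) (t : List Char) (h : PySem.Chars.isdigit c = true) :
    pvWordsB.find? (fun wd => PySem.Chars.startswith (c :: t) wd.1) = none := by
  have hc := pv_digit_le c h
  rw [List.find?_eq_none]
  intro wd hwd
  simp only [Bool.not_eq_true]
  rw [← Bool.not_eq_true, PySem.Chars.startswith_iff]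
  intro hpre
  fin_cases hwd <;>
    · obtain ⟨u, hu⟩ := hpre
      injection hu with h1 _
      subst h1
      revert hc
      decide

lemma pv_flatMap_singleton {α β : Type} (l : List α) (f : α → β) :
    l.flatMap (fun a => [f a]) = l.map f := by
  induction l with
  | nil => rfl
  | cons a l ih => simp [List.flatMap_cons, ih]

lemma pv_piece (cs : List Char) (k : Nat) :
    (match pvTransA.keys.find? (fun kk => PySem.Chars.startswith (cs.drop k) kk) with
     | some word => pvTransA.getD word []
     | none => [cs.getD k ' ']) = [pvChar cs k] := by
  have hkeys : pvTransA.keys.find? (fun kk => PySem.Chars.startswith (cs.drop k) kk)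
      = (pvWordsB.find? (fun wd => PySem.Chars.startswith (cs.drop k) wd.1)).map (·.1) := by
    rw [pv_keys_eq, List.find?_map]; rfl
  rw [hkeys]
  unfold pvChar
  cases hf : pvWordsB.find? (fun wd => PySem.Chars.startswith (cs.drop k) wd.1) with
  | none => simp
  | some wd => simpa using pv_getD_eq wd (List.mem_of_find?_eq_some hf)

lemma pv_replace_eq_map (cs : List Char) :
    replace_digits cs = (List.range cs.length).map (pvChar cs) := by
  unfold replace_digits
  have hbody : (fun (res : List Char) (ic : Int × Char) =>
      match pvTransA.keys.find? (fun k =>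
          PySem.Chars.startswith (PySem.List.slice cs (some ic.1) none) k) with
      | some word => res ++ pvTransA.getD word []
      | none => res ++ [ic.2])
      = (fun res ic => res ++
          (match pvTransA.keys.find? (fun k =>
              PySem.Chars.startswith (PySem.List.slice cs (some ic.1) none) k) with
           | some word => pvTransA.getD word []
           | none => [ic.2])) := by
    funext res ic
    cases pvTransA.keys.find? (fun k =>
        PySem.Chars.startswith (PySem.List.slice cs (some ic.1) none) k) <;> rfl
  rw [hbody, PySem.List.foldl_append_eq_flatMap]
  rw [PySem.List.enumerate_eq_map_pyRange cs ' ']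
  have hlen : PySem.List.len cs = ((cs.length : Nat) : Int) := rfl
  rw [hlen, PySem.List.pyRange_zero_natCast cs.length, List.map_map, List.flatMap_map]
  have hcong : ∀ k ∈ List.range cs.length,
      (match pvTransA.keys.find? (fun kk =>
          PySem.Chars.startswith (PySem.List.slice cs (some ((k : Nat) : Int)) none) kk) with
       | some word => pvTransA.getD word []
       | none => [PySem.List.pyGetD cs ((k : Nat) : Int) ' ']) = [pvChar cs k] := by
    intro k _
    rw [show PySem.List.slice cs (some ((k : Nat) : Int)) none = cs.drop k from
        PySem.List.slice_from_natCast cs k,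
      PySem.List.pyGetD_natCast]
    exact pv_piece cs k
  calc List.flatMap (fun k : Nat =>
        (fun ic : Int × Char =>
          match pvTransA.keys.find? (fun kk =>
              PySem.Chars.startswith (PySem.List.slice cs (some ic.1) none) kk) with
          | some word => pvTransA.getD word []
          | none => [ic.2]) ((fun j => (j, PySem.List.pyGetD cs j ' ')) ((k : Nat) : Int)))
        (List.range cs.length)
      = List.flatMap (fun k => [pvChar cs k]) (List.range cs.length) :=
        List.flatMap_congr hcong
    _ = (List.range cs.length).map (pvChar cs) := pv_flatMap_singleton _ _

lemma pv_pointwise (cs : List Char) (k : Nat) (hk : k < cs.length) :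
    (PySem.Chars.isdigit (pvChar cs k) = true ↔ (digit_at cs k).isSome = true) ∧
    (∀ d, digit_at cs k = some d → pvChar cs k = d) := by
  have hget : PySem.List.pyGet? cs ((k : Nat) : Int) = some cs[k] := by
    rw [PySem.List.pyGet?_natCast]
    exact List.getElem?_eq_getElem hk
  have hget2 : cs[k]? = some cs[k] := List.getElem?_eq_getElem hk
  have hdrop : cs.drop k = cs[k] :: cs.drop (k + 1) := List.drop_eq_getElem_cons hk
  unfold digit_at pvChar
  rw [hget]
  by_cases hd : PySem.Chars.isdigit cs[k] = true
  · rw [hdrop, pv_digit_no_word _ _ hd]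
    simp [hd, List.getD, hget2]
  · cases hf : pvWordsB.find? (fun wd => PySem.Chars.startswith (cs.drop k) wd.1) with
    | none =>
      simp [hd, List.getD, hget2]
    | some wd =>
      simp [hd, pv_snd_digit wd (List.mem_of_find?_eq_some hf)]

lemma pv_find_findSome (l : List Nat) (g : Nat → Char) (f : Nat → Option Char)
    (h : ∀ k ∈ l, (PySem.Chars.isdigit (g k) = true ↔ (f k).isSome = true) ∧
      (∀ d, f k = some d → g k = d)) :
    (l.map g).find? PySem.Chars.isdigit = l.findSome? f := by
  induction l with
  | nil => rfl
  | cons a l ih =>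
    have ha := h a (by simp)
    rw [List.map_cons, List.findSome?_cons]
    cases hf : f a with
    | some d =>
      have hg : g a = d := ha.2 d hf
      have hdig : PySem.Chars.isdigit (g a) = true := ha.1.mpr (by simp [hf])
      rw [List.find?_cons_of_pos hdig, hg]
    | none =>
      have hdig : ¬ PySem.Chars.isdigit (g a) = true := by
        intro hdg
        have := ha.1.mp hdg
        rw [hf] at this
        simp at this
      rw [List.find?_cons_of_neg hdig]
      exact ih (fun k hk => h k (List.mem_cons_of_mem a hk))

lemma pv_line_eq (line : String) :
    ((replace_digits line.toList).find? PySem.Chars.isdigit = first_digit line.toList) ∧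
    ((replace_digits line.toList).reverse.find? PySem.Chars.isdigit = last_digit line.toList) := by
  constructor
  · rw [pv_replace_eq_map, first_digit]
    exact pv_find_findSome _ _ _
      (fun k hk => pv_pointwise line.toList k (List.mem_range.mp hk))
  · rw [pv_replace_eq_map, last_digit, ← List.map_reverse]
    exact pv_find_findSome _ _ _
      (fun k hk => pv_pointwise line.toList k (List.mem_range.mp (List.mem_reverse.mp hk)))

-- ===== VERDICT (by name: the statement is the Claim_ definition above) =====
theorem part_2_spec : Claim_equal_part_2 := by
  intro input_data _ _
  unfold Spec_part_2 part_2 part_2_alt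
  rw [PySem.List.foldl_add input_data
    (fun line => (PySem.Int.ofChars? [(first_digit line.toList).getD '0',
      (last_digit line.toList).getD '0']).getD 0) 0, Int.zero_add]
  apply congrArg List.sum
  apply List.map_congr_left
  intro line _
  have h := pv_line_eq line
  simp only [h.1, h.2]
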